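-- pv_equiv track=rewrite | github.com/noTirT/AdventOfCode | day1/part1.py | calc_config_sum
-- ===== SOURCE A (Python) =====
-- def calc_config_sum(input_arr):
--     sum = 0
--     for line in input_arr:
--         left, right = 0, len(line) - 1
--         first, last = "", ""
--         while left <= right and (first == "" or last == ""):
--             if line[left].isdigit():
--                 first = line[left]
--             if line[right].isdigit():
--                 last = line[right]
--             if first == "":
--                 left += 1
--             if last == "":
--                 right -= 1
--
--         temp = int(f"{first}{last}")
--         sum += temp
--     return sum
-- ===== SOURCE B (Python) =====
-- def calc_config_sum(input_arr):
--     def line_value(line):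
--         digits = [c for c in line if c.isdigit()]
--         return int(digits[0] + digits[-1])
--     return sum(line_value(line) for line in input_arr)
-- ===== Notes on version B (the rewrite author's own statement) =====
-- stated objective: simpler
-- what changed: A's stateful bidirectional two-pointer while-loop (left/right indices with conditional advancement) is replaced by filtering each line's digit characters into one list and reading its first and last elements, summed with a comprehension.
-- outside the precondition, e.g. on calc_config_sum(['abc']): A raises ValueError, B raises IndexError
import Mathlib
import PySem

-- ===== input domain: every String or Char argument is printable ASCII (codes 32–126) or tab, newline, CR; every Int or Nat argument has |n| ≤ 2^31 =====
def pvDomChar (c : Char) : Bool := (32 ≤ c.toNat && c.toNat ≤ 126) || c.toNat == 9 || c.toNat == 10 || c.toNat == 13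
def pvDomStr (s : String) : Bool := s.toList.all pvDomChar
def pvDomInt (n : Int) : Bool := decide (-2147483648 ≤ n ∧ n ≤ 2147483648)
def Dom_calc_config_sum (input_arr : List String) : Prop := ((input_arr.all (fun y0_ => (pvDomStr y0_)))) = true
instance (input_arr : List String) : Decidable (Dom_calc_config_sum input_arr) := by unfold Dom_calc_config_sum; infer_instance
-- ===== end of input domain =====

-- B replaces A's bidirectional two-pointer while-loop by filtering each line's digits once and
-- reading the first and last of them (objective: simpler).

-- ===== PORT A =====
-- A's while-loop: state (left, right, first, last); first/last are "" or one char, kept as List Char;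
-- fuel (len(line)+1) bounds the iterations, which Python's loop never exceeds.
def pvLoopA (cs : List Char) : Nat → Int → Int → List Char → List Char → List Char × List Char
  | 0, _, _, f, la => (f, la)
  | fuel + 1, l, r, f, la =>
    if l ≤ r ∧ (f = [] ∨ la = []) then
      let f' := if PySem.Chars.isdigit (PySem.List.pyGetD cs l ' ') then [PySem.List.pyGetD cs l ' '] else f
      let la' := if PySem.Chars.isdigit (PySem.List.pyGetD cs r ' ') then [PySem.List.pyGetD cs r ' '] else la
      pvLoopA cs fuel (if f' = [] then l + 1 else l) (if la' = [] then r - 1 else r) f' la'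
    else (f, la)

-- one iteration of A's outer for-loop: int(f"{first}{last}") (0 where the Python raises ValueError, excluded by Pre_)
def pvLineA (line : String) : Int :=
  let cs := line.toList
  let p := pvLoopA cs (cs.length + 1) 0 ((cs.length : Int) - 1) [] []
  (PySem.Int.ofChars? (p.1 ++ p.2)).getD 0

def calc_config_sum (input_arr : List String) : Int :=
  input_arr.foldl (fun s line => s + pvLineA line) 0

-- ===== PORT B =====
-- digits = [c for c in line if c.isdigit()]; int(digits[0] + digits[-1]) (0 where the Python raises, excluded by Pre_)
def pvLineB (line : String) : Int :=
  let digits := line.toList.filter PySem.Chars.isdigit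
  match PySem.List.pyGet? digits 0, PySem.List.pyGet? digits (-1) with
  | some a, some b => (PySem.Int.ofChars? [a, b]).getD 0
  | _, _ => 0

def calc_config_sum_alt (input_arr : List String) : Int :=
  (input_arr.map pvLineB).sum

-- ===== PRECONDITION & SPEC =====
-- Pre_ excludes inputs containing a line with no digit character: on those A's int('') raises ValueError (B raises IndexError).
def Pre_calc_config_sum (input_arr : List String) : Prop :=
  ∀ s ∈ input_arr, s.toList.any PySem.Chars.isdigit = true

instance (input_arr : List String) : Decidable (Pre_calc_config_sum input_arr) := by
  unfold Pre_calc_config_sum; infer_instance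

def pvWitness_calc_config_sum : List String := ["1abc2", "treb7uchet"]

def Spec_calc_config_sum (input_arr : List String) (out : Int) : Prop := out = calc_config_sum_alt input_arr
instance (input_arr : List String) (out : Int) : Decidable (Spec_calc_config_sum input_arr out) := by unfold Spec_calc_config_sum; infer_instance

-- ===== CLAIM (what is proved, stated in full; the proofs are below) =====
def Claim_equal_calc_config_sum : Prop := ∀ (input_arr : List String), Dom_calc_config_sum input_arr → Pre_calc_config_sum input_arr → Spec_calc_config_sum input_arr (calc_config_sum input_arr)

-- ===== LEMMAS AND PROOFS =====

-- once both first and last are set, A's loop returns them unchanged, whatever the fuel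
lemma pvLoopA_done (cs : List Char) (fuel : Nat) (l r : Int) (f la : List Char)
    (hf : f ≠ []) (hla : la ≠ []) : pvLoopA cs fuel l r f la = (f, la) := by
  cases fuel with
  | zero => rfl
  | succ n => simp [pvLoopA, hf, hla]

-- invariant run of A's loop: left never passes the first digit (index d), right never passes the
-- last digit (index e), so the loop returns ([cs[d]], [cs[e]])
lemma pvLoopA_main (cs : List Char) (d e : Nat)
    (hdlen : d < cs.length) (helen : e < cs.length)
    (hd : PySem.Chars.isdigit cs[d] = true) (he : PySem.Chars.isdigit cs[e] = true)
    (hdmin : ∀ i, (h : i < cs.length) → i < d → PySem.Chars.isdigit cs[i] = false)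
    (hemax : ∀ i, (h : i < cs.length) → e < i → PySem.Chars.isdigit cs[i] = false) :
    ∀ fuel (ln rn : Nat) (f la : List Char),
      (f = [] ∧ ln ≤ d ∨ f = [cs[d]] ∧ ln = d) →
      (la = [] ∧ e ≤ rn ∧ rn < cs.length ∨ la = [cs[e]] ∧ rn = e) →
      (d - ln) + (rn - e) < fuel →
      pvLoopA cs fuel (ln : Int) (rn : Int) f la = ([cs[d]], [cs[e]]) := by
  have hde : d ≤ e := by
    by_contra h
    have h2 := hdmin e helen (by omega)
    rw [he] at h2; exact absurd h2 (by simp)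
  intro fuel
  induction fuel with
  | zero => intro ln rn f la _ _ hfuel; omega
  | succ n ih =>
    intro ln rn f la hf hla hfuel
    rcases hf with ⟨hf0, hfd⟩ | ⟨hf0, hfd⟩ <;>
      rcases hla with ⟨hla0, hlae, hlalen⟩ | ⟨hla0, hlae⟩ <;>
      subst hf0 <;> subst hla0
    · -- f = [], la = []
      have hln : ln < cs.length := by omega
      rw [pvLoopA, if_pos ⟨by exact_mod_cast (by omega : ln ≤ rn), Or.inl rfl⟩]
      simp only [PySem.List.pyGetD_natCast, List.getD_eq_getElem _ _ hln,
        List.getD_eq_getElem _ _ hlalen]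
      by_cases h1 : PySem.Chars.isdigit cs[ln] = true <;>
        by_cases h2 : PySem.Chars.isdigit cs[rn] = true
      · have hlnd : d = ln := by
          by_contra hne
          have hw := hdmin ln hln (by omega); rw [h1] at hw; exact absurd hw (by simp)
        have hrne : e = rn := by
          by_contra hne
          have hw := hemax rn hlalen (by omega); rw [h2] at hw; exact absurd hw (by simp)
        subst hlnd; subst hrne
        simp only [h1, h2, if_true, List.cons_ne_nil]
        exact pvLoopA_done cs n _ _ _ _ (by simp) (by simp)
      · have hlnd : d = ln := by
          by_contra hne
          have hw := hdmin ln hln (by omega); rw [h1] at hw; exact absurd hw (by simp)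
        subst hlnd
        have hrne : e < rn := by
          by_contra hge
          have hre : rn = e := by omega
          subst hre
          exact h2 he
        simp only [h1, h2, if_true, if_false, List.cons_ne_nil]
        have hcast : (rn : Int) - 1 = ((rn - 1 : Nat) : Int) := by omega
        rw [hcast]
        exact ih d (rn - 1) _ _ (Or.inr ⟨rfl, rfl⟩) (Or.inl ⟨rfl, by omega, by omega⟩) (by omega)
      · have hlnd : ln < d := by
          by_contra hge
          have hld : d = ln := by omega
          subst hld
          exact h1 hd
        have hrne : e = rn := by
          by_contra hne
          have hw := hemax rn hlalen (by omega); rw [h2] at hw; exact absurd hw (by simp)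
        subst hrne
        simp only [h1, h2, if_true, if_false, List.cons_ne_nil]
        have hcast : (ln : Int) + 1 = ((ln + 1 : Nat) : Int) := by omega
        rw [hcast]
        exact ih (ln + 1) e _ _ (Or.inl ⟨rfl, by omega⟩) (Or.inr ⟨rfl, rfl⟩) (by omega)
      · have hlnd : ln < d := by
          by_contra hge
          have hld : d = ln := by omega
          subst hld
          exact h1 hd
        have hrne : e < rn := by
          by_contra hge
          have hre : rn = e := by omega
          subst hre
          exact h2 he
        simp only [h1, h2]
        have hcast1 : (ln : Int) + 1 = ((ln + 1 : Nat) : Int) := by omega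
        have hcast2 : (rn : Int) - 1 = ((rn - 1 : Nat) : Int) := by omega
        rw [hcast1, hcast2]
        exact ih (ln + 1) (rn - 1) _ _ (Or.inl ⟨rfl, by omega⟩)
          (Or.inl ⟨rfl, by omega, by omega⟩) (by omega)
    · -- f = [], la = [cs[e]] (rn = e)
      subst rn
      have hln : ln < cs.length := by omega
      rw [pvLoopA, if_pos ⟨by exact_mod_cast (by omega : ln ≤ e), Or.inl rfl⟩]
      simp only [PySem.List.pyGetD_natCast, List.getD_eq_getElem _ _ hln,
        List.getD_eq_getElem _ _ helen]
      by_cases h1 : PySem.Chars.isdigit cs[ln] = true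
      · have hlnd : d = ln := by
          by_contra hne
          have hw := hdmin ln hln (by omega); rw [h1] at hw; exact absurd hw (by simp)
        subst hlnd
        simp only [h1, he, if_true, List.cons_ne_nil]
        exact pvLoopA_done cs n _ _ _ _ (by simp) (by simp)
      · have hlnd : ln < d := by
          by_contra hge
          have hld : d = ln := by omega
          subst hld
          exact h1 hd
        simp only [h1, he, if_true, if_false, List.cons_ne_nil]
        have hcast : (ln : Int) + 1 = ((ln + 1 : Nat) : Int) := by omega
        rw [hcast]
        exact ih (ln + 1) e _ _ (Or.inl ⟨rfl, by omega⟩) (Or.inr ⟨rfl, rfl⟩) (by omega)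
    · -- f = [cs[d]] (ln = d), la = []
      subst ln
      rw [pvLoopA, if_pos ⟨by exact_mod_cast (by omega : d ≤ rn), Or.inr rfl⟩]
      simp only [PySem.List.pyGetD_natCast, List.getD_eq_getElem _ _ hdlen,
        List.getD_eq_getElem _ _ hlalen]
      by_cases h2 : PySem.Chars.isdigit cs[rn] = true
      · have hrne : e = rn := by
          by_contra hne
          have hw := hemax rn hlalen (by omega); rw [h2] at hw; exact absurd hw (by simp)
        subst hrne
        simp only [hd, h2, if_true, List.cons_ne_nil]
        exact pvLoopA_done cs n _ _ _ _ (by simp) (by simp)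
      · have hrne : e < rn := by
          by_contra hge
          have hre : rn = e := by omega
          subst hre
          exact h2 he
        simp only [hd, h2, if_true, if_false, List.cons_ne_nil]
        have hcast : (rn : Int) - 1 = ((rn - 1 : Nat) : Int) := by omega
        rw [hcast]
        exact ih d (rn - 1) _ _ (Or.inr ⟨rfl, rfl⟩) (Or.inl ⟨rfl, by omega, by omega⟩) (by omega)
    · -- both set already
      subst hfd; subst hlae
      exact pvLoopA_done cs (n + 1) _ _ _ _ (by simp) (by simp)

-- the head of a filtered list is the element at findIdx
lemma filter_head_findIdx (p : Char → Bool) :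
    ∀ cs : List Char, cs.any p = true →
      (cs.filter p).head? = cs[cs.findIdx p]? := by
  intro cs h
  induction cs with
  | nil => simp at h
  | cons c cs ih =>
    by_cases hc : p c = true
    · simp [hc, List.findIdx_cons]
    · have hcs : cs.any p = true := by
        rcases List.any_eq_true.mp h with ⟨x, hx, hpx⟩
        rcases List.mem_cons.mp hx with rfl | hx'
        · exact absurd hpx hc
        · exact List.any_eq_true.mpr ⟨x, hx', hpx⟩
      simp [hc, List.findIdx_cons, ih hcs]

-- per-line agreement: A's two-pointer scan and B's filter produce the same two digits
lemma line_eq (line : String) (h : line.toList.any PySem.Chars.isdigit = true) :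
    pvLineA line = pvLineB line := by
  obtain ⟨cs, hcs⟩ : ∃ cs, line.toList = cs := ⟨_, rfl⟩
  have hex : ∃ x ∈ cs, PySem.Chars.isdigit x = true := by
    simpa [hcs, List.any_eq_true] using h
  obtain ⟨d, hdd⟩ : ∃ d, cs.findIdx PySem.Chars.isdigit = d := ⟨_, rfl⟩
  have hdlen : d < cs.length := hdd ▸ List.findIdx_lt_length.mpr hex
  have hrevany : cs.reverse.any PySem.Chars.isdigit = true := by
    rw [List.any_reverse]
    simpa [hcs] using h
  obtain ⟨k, hkk⟩ : ∃ k, cs.reverse.findIdx PySem.Chars.isdigit = k := ⟨_, rfl⟩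
  have hklen : k < cs.length := by
    have h2 : cs.reverse.findIdx PySem.Chars.isdigit < cs.reverse.length :=
      List.findIdx_lt_length.mpr (by simpa [List.any_eq_true] using hrevany)
    rw [hkk, List.length_reverse] at h2; exact h2
  obtain ⟨e, hee⟩ : ∃ e, cs.length - 1 - k = e := ⟨_, rfl⟩
  have helen : e < cs.length := by omega
  have hrevidx : cs[e] = cs.reverse[k]'(by simp; omega) := by
    rw [List.getElem_eq_getElem_reverse helen]
    congr 1
    omega
  have hd : PySem.Chars.isdigit cs[d] = true := by
    subst hdd; exact List.findIdx_getElem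
  have he : PySem.Chars.isdigit cs[e] = true := by
    rw [hrevidx]
    subst hkk; exact List.findIdx_getElem
  have hdmin : ∀ i, (hi : i < cs.length) → i < d → PySem.Chars.isdigit cs[i] = false := by
    intro i hi hid
    exact List.not_of_lt_findIdx (hdd ▸ hid)
  have hde : d ≤ e := by
    by_contra hlt
    have hw := hdmin e helen (by omega)
    rw [he] at hw; exact absurd hw (by simp)
  have hemax : ∀ i, (hi : i < cs.length) → e < i → PySem.Chars.isdigit cs[i] = false := by
    intro i hi hei
    have hj : cs.length - 1 - i < k := by omega
    have hidx : cs[i] = cs.reverse[cs.length - 1 - i]'(by simp; omega) :=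
      List.getElem_eq_getElem_reverse hi
    rw [hidx]
    exact List.not_of_lt_findIdx (hkk ▸ hj)
  have hloop : pvLoopA cs (cs.length + 1) 0 ((cs.length : Int) - 1) [] []
      = ([cs[d]], [cs[e]]) := by
    have h0 : (0 : Int) = ((0 : Nat) : Int) := rfl
    have h1 : (cs.length : Int) - 1 = ((cs.length - 1 : Nat) : Int) := by omega
    rw [h0, h1]
    exact pvLoopA_main cs d e hdlen helen hd he hdmin hemax (cs.length + 1) 0 (cs.length - 1)
      [] [] (Or.inl ⟨rfl, by omega⟩) (Or.inl ⟨rfl, by omega, by omega⟩) (by omega)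
  have hany : cs.any PySem.Chars.isdigit = true := by simpa [hcs] using h
  have hB0 : PySem.List.pyGet? (cs.filter PySem.Chars.isdigit) 0 = some cs[d] := by
    rw [show (0 : Int) = ((0 : Nat) : Int) from rfl,
      PySem.List.pyGet?_natCast (cs.filter PySem.Chars.isdigit) 0,
      ← List.head?_eq_getElem?, filter_head_findIdx PySem.Chars.isdigit cs hany, hdd,
      List.getElem?_eq_getElem hdlen]
  have hB1 : PySem.List.pyGet? (cs.filter PySem.Chars.isdigit) (-1) = some cs[e] := by
    rw [PySem.List.pyGet?_neg_one, ← List.head?_reverse, ← List.filter_reverse,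
      filter_head_findIdx PySem.Chars.isdigit cs.reverse hrevany, hkk,
      List.getElem?_eq_getElem (by simpa using hklen), hrevidx]
  rw [pvLineA, pvLineB]
  simp only [hcs, hloop, hB0, hB1]
  rfl

-- ===== VERDICT (by name: the statement is the Claim_ definition above) =====
theorem calc_config_sum_spec : Claim_equal_calc_config_sum := by
  intro input_arr _hdom hpre
  unfold Spec_calc_config_sum calc_config_sum calc_config_sum_alt
  rw [PySem.List.foldl_add input_arr pvLineA 0, zero_add]
  congr 1
  exact List.map_congr_left (fun s hs => line_eq s (hpre s hs))
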